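-- pv_equiv track=rewrite | github.com/ebby-s/ALevelCS | Python Challenges/ebbyA224.py | de_oblique
-- ===== SOURCE A (Python) =====
-- def de_oblique(array):
--     height = max([len(x) for x in array])
--     width = len(array)+1 - height
--     new_array = [[] for x in range(height)]
--     for y,row in enumerate(array):
--         for x,element in enumerate(row):
--             if y<width: new_array[x].append(element)
--             else: new_array[x+1+y-width].append(element)
--     return new_array
-- ===== SOURCE B (Python) =====
-- def de_oblique(array):
--     height = max(len(x) for x in array)
--     width = len(array) + 1 - height
--     pairs = [(x + max(0, y - width + 1), e)
--              for y, row in enumerate(array)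
--              for x, e in enumerate(row)]
--     out = [[] for _ in range(height)]
--     for t, e in sorted(pairs, key=lambda p: p[0]):
--         out[t].append(e)
--     return out
-- ===== Notes on version B (the rewrite author's own statement) =====
-- stated objective: alternative
-- what changed: A scatters element by element into a preallocated grid with two index-arithmetic branches inside nested loops; B flattens the input into (destination row, element) pairs with one unified base formula, stable-sorts the pairs by destination, and fills the grid in a single loop. Pre_ excludes the inputs on which both Pythons raise: the empty list (ValueError) and obliques with an element whose destination row lies past the grid height (IndexError).
import Mathlib
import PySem

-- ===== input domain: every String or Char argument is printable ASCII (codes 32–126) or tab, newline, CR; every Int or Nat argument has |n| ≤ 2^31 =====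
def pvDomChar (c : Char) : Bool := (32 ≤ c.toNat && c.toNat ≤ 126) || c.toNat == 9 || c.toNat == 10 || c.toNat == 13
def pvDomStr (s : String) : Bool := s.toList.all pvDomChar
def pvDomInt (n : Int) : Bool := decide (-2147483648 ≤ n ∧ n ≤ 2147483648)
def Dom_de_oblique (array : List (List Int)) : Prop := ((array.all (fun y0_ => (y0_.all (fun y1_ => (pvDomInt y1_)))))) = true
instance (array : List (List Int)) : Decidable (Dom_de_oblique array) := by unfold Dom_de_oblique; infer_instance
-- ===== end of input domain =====

-- B replaces A's two-branch nested-loop scatter by a flatten / stable-sort / fill pipeline: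
-- one comprehension computes every element's destination row, a stable sort groups the pairs
-- by destination, and a single loop fills the grid; different decomposition, same cost class.

-- ===== PORT A =====
-- new_array[i].append(e)  (list mutation at index i; IndexError excluded by Pre_)
def pvAppendAt (na : List (List Int)) (i : Int) (e : Int) : List (List Int) :=
  PySem.List.pySetD na i (PySem.List.pyGetD na i [] ++ [e])

def de_oblique (array : List (List Int)) : List (List Int) :=
  match PySem.List.max? (array.map (fun x => PySem.List.len x)) (fun v => v) with
  | none => []  -- Python: ValueError on empty input; excluded by Pre_
  | some height =>
    let width : Int := PySem.List.len array + 1 - height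
    let init : List (List Int) := (PySem.List.pyRange 0 height 1).map (fun _ => [])
    (PySem.List.enumerate array 0).foldl (fun na p =>
      (PySem.List.enumerate p.2 0).foldl (fun na q =>
        if p.1 < width then pvAppendAt na q.1 q.2
        else pvAppendAt na (q.1 + 1 + p.1 - width) q.2) na) init

-- ===== PORT B =====
def de_oblique_alt (array : List (List Int)) : List (List Int) :=
  match PySem.List.max? (array.map (fun x => PySem.List.len x)) (fun v => v) with
  | none => []  -- Python: ValueError on empty input; excluded by Pre_
  | some height =>
    let width : Int := PySem.List.len array + 1 - height
    let pairs := (PySem.List.enumerate array 0).flatMap (fun p =>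
      (PySem.List.enumerate p.2 0).map (fun q => (q.1 + max 0 (p.1 - width + 1), q.2)))
    let out : List (List Int) := (PySem.List.pyRange 0 height 1).map (fun _ => [])
    (PySem.List.sorted pairs (fun t => t.1) false).foldl (fun na t => pvAppendAt na t.1 t.2) out

-- ===== PRECONDITION & SPEC =====
-- Pre_ excludes exactly the inputs on which BOTH Pythons raise: the empty list (ValueError
-- from max of nothing) and malformed obliques with an element whose destination row lies past
-- the output height (IndexError from the append at that row, in A's scatter and B's fill alike).
def Pre_de_oblique (array : List (List Int)) : Prop :=
  array ≠ [] ∧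
  ∀ p ∈ PySem.List.enumerate array 0,
    (array.length : Int) + 1 - ((array.map (fun r => (r.length : Int))).foldl max 0) ≤ p.1 →
    (p.2.length : Int) ≤ (array.length : Int) - p.1
instance (array : List (List Int)) : Decidable (Pre_de_oblique array) := by
  unfold Pre_de_oblique; infer_instance

def pvWitness_de_oblique : List (List Int) := [[1], [2, 4], [3, 5], [6]]

def Spec_de_oblique (array : List (List Int)) (out : List (List Int)) : Prop := out = de_oblique_alt array
instance (array : List (List Int)) (out : List (List Int)) : Decidable (Spec_de_oblique array out) := by unfold Spec_de_oblique; infer_instance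

-- ===== CLAIM (what is proved, stated in full; the proofs are below) =====
def Claim_equal_de_oblique : Prop := ∀ (array : List (List Int)), Dom_de_oblique array → Pre_de_oblique array → Spec_de_oblique array (de_oblique array)

-- ===== LEMMAS AND PROOFS =====

theorem pvAppendAt_length (na : List (List Int)) (i : Int) (e : Int) :
    (pvAppendAt na i e).length = na.length := by
  simp [pvAppendAt, PySem.List.length_pySetD]

theorem pvAppendAt_getElem? (na : List (List Int)) (i : Int) (e : Int)
    (h0 : 0 ≤ i) (h1 : i < (na.length : Int)) (k : Nat) (hk : k < na.length) :
    (pvAppendAt na i e)[k]? = some (if i = (k : Int) then na[k] ++ [e] else na[k]) := by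
  rw [pvAppendAt, PySem.List.pySetD_of_nonneg _ _ h0,
    PySem.List.pyGetD_eq_getElem _ _ h0 h1, List.getElem?_set]
  have hlt : i.toNat < na.length := by omega
  split_ifs with h2 h3 h3 <;> simp_all
  omega

-- the scatter loop: fold of pvAppendAt over an (index, element) list
def pvScatter (na : List (List Int)) (L : List (Int × Int)) : List (List Int) :=
  L.foldl (fun na q => pvAppendAt na q.1 q.2) na

theorem pvScatter_length (L : List (Int × Int)) (na : List (List Int)) :
    (pvScatter na L).length = na.length := by
  induction L generalizing na with
  | nil => rfl
  | cons q L ih => rw [pvScatter, List.foldl_cons, ← pvScatter, ih, pvAppendAt_length]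

theorem pvAppendAt_oob (na : List (List Int)) (i : Int) (e : Int)
    (h : (na.length : Int) ≤ i) : pvAppendAt na i e = na := by
  rw [pvAppendAt, PySem.List.pySetD]
  rw [show PySem.List.pySet? na i (PySem.List.pyGetD na i [] ++ [e]) = none from
    (PySem.List.pySet?_eq_none_iff _ _ _).2 (by simp [PySem.Raise.InRange]; omega)]
  rfl

theorem pvScatter_getElem? (L : List (Int × Int)) :
    ∀ (na : List (List Int)), (∀ q ∈ L, 0 ≤ q.1) →
    ∀ (k : Nat) (hk : k < na.length),
    (pvScatter na L)[k]? = some (na[k] ++ L.filterMap (fun q => if q.1 = (k : Int) then some q.2 else none)) := by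
  induction L with
  | nil => intro na _ k hk; simp [pvScatter, List.getElem?_eq_getElem hk]
  | cons q L ih =>
    intro na hL k hk
    have hq := hL q (List.mem_cons_self)
    have hstep : pvScatter na (q :: L) = pvScatter (pvAppendAt na q.1 q.2) L := rfl
    have hlen : (pvAppendAt na q.1 q.2).length = na.length := pvAppendAt_length ..
    have hk' : k < (pvAppendAt na q.1 q.2).length := by omega
    have ih' := ih (pvAppendAt na q.1 q.2)
      (fun r hr => hL r (List.mem_cons_of_mem _ hr)) k hk'
    by_cases hin : q.1 < (na.length : Int)
    · have hget : (pvAppendAt na q.1 q.2)[k] = if q.1 = (k : Int) then na[k] ++ [q.2] else na[k] := by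
        have := pvAppendAt_getElem? na q.1 q.2 hq hin k hk
        rw [List.getElem?_eq_getElem hk'] at this
        exact Option.some_injective _ this
      rw [hstep, ih', hget]
      by_cases hqk : q.1 = (k : Int)
      · simp [hqk, List.append_assoc]
      · simp [hqk]
    · have hoob : pvAppendAt na q.1 q.2 = na := pvAppendAt_oob na q.1 q.2 (by omega)
      rw [hstep, hoob, ih na (fun r hr => hL r (List.mem_cons_of_mem _ hr)) k hk]
      have hne : ¬ q.1 = (k : Int) := by omega
      simp [hne]

-- the scatter target index is base + x, with base = max 0 (y - width + 1)
theorem pvTgtEq (w y x : Int) :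
    (if y < w then x else x + 1 + y - w) = x + max 0 (y - w + 1) := by
  split_ifs with h <;> omega

theorem pvA_eq_scatter (arr : List (List Int)) (w : Int) (init : List (List Int)) :
    (PySem.List.enumerate arr 0).foldl (fun na p =>
        (PySem.List.enumerate p.2 0).foldl (fun na q =>
          if p.1 < w then pvAppendAt na q.1 q.2
          else pvAppendAt na (q.1 + 1 + p.1 - w) q.2) na) init
      = pvScatter init ((PySem.List.enumerate arr 0).flatMap (fun p =>
          (PySem.List.enumerate p.2 0).map (fun q => (q.1 + max 0 (p.1 - w + 1), q.2)))) := by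
  rw [pvScatter, List.foldl_flatMap]
  congr 1
  funext na p
  rw [List.foldl_map]
  congr 1
  funext na q
  rw [← apply_ite (fun i => pvAppendAt na i q.2), pvTgtEq]

-- a stable sort by destination does not change which elements land in row k, nor their order
theorem pvPicks_insertBy (k : Int) (x : Int × Int) (ys : List (Int × Int))
    (h : ys.Pairwise (fun a b => a.1 ≤ b.1)) :
    (PySem.List.insertBy (fun a b => decide (a.1 < b.1)) x ys).filterMap
        (fun q => if q.1 = k then some q.2 else none)
      = ys.filterMap (fun q => if q.1 = k then some q.2 else none)
        ++ (if x.1 = k then [x.2] else []) := by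
  induction ys with
  | nil =>
    rw [PySem.List.insertBy]
    split_ifs with hx <;> simp [hx]
  | cons y t ih =>
    rcases List.pairwise_cons.1 h with ⟨hy, ht⟩
    rw [PySem.List.insertBy]
    by_cases hlt : x.1 < y.1
    · rw [if_pos (by simpa using hlt)]
      by_cases hx : x.1 = k
      · have hnil : (y :: t).filterMap (fun q => if q.1 = k then some q.2 else none) = [] := by
          rw [List.filterMap_eq_nil_iff]
          intro q hq
          rcases List.mem_cons.1 hq with rfl | hq
          · simp; omega
          · have := hy q hq; simp; omega
        simp [hnil, hx]
      · simp [hx]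
    · rw [if_neg (by simpa using hlt), List.filterMap_cons, List.filterMap_cons, ih ht]
      cases hyk : (fun q : Int × Int => if q.1 = k then some q.2 else none) y <;> simp [hyk]

theorem pvPicks_sorted (k : Int) (L : List (Int × Int)) :
    (PySem.List.sorted L (fun t => t.1) false).filterMap
        (fun q => if q.1 = k then some q.2 else none)
      = L.filterMap (fun q => if q.1 = k then some q.2 else none) := by
  induction L using List.reverseRecOn with
  | nil => rfl
  | append_singleton L x ih =>
    rw [PySem.List.sorted_eq_foldl_insertBy, List.foldl_append, List.foldl_cons, List.foldl_nil,
      ← PySem.List.sorted_eq_foldl_insertBy,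
      pvPicks_insertBy k x _ (PySem.List.sorted_pairwise L (fun t => t.1)), ih,
      List.filterMap_append, List.filterMap_cons, List.filterMap_nil]
    split_ifs <;> simp

-- scattering a stably destination-sorted pair list gives the same grid as scattering in place
theorem pvScatter_sorted (L : List (Int × Int)) (hL : ∀ q ∈ L, 0 ≤ q.1)
    (init : List (List Int)) :
    pvScatter init (PySem.List.sorted L (fun t => t.1) false) = pvScatter init L := by
  have hL' : ∀ q ∈ PySem.List.sorted L (fun t => t.1) false, 0 ≤ q.1 := by
    intro q hq
    exact hL q ((PySem.List.mem_sorted _ _ _ _).1 hq)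
  apply List.ext_getElem?
  intro k
  by_cases hk : k < init.length
  · rw [pvScatter_getElem? _ _ hL' k hk, pvScatter_getElem? _ _ hL k hk, pvPicks_sorted]
  · rw [List.getElem?_eq_none, List.getElem?_eq_none] <;> rw [pvScatter_length] <;> omega

-- ===== VERDICT (by name: the statement is the Claim_ definition above) =====
theorem de_oblique_spec : Claim_equal_de_oblique := by
  intro array _ _
  unfold Spec_de_oblique de_oblique de_oblique_alt
  cases hmax : PySem.List.max? (array.map (fun x => PySem.List.len x)) (fun v => v) with
  | none => rfl
  | some height =>
    dsimp only
    rw [pvA_eq_scatter]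
    rw [show ∀ (M : List (Int × Int)) (init : List (List Int)),
        M.foldl (fun na t => pvAppendAt na t.1 t.2) init = pvScatter init M from fun _ _ => rfl]
    apply (pvScatter_sorted _ ?_ _).symm
    intro q hq
    rcases List.mem_flatMap.1 hq with ⟨p, hp, hq2⟩
    rcases List.mem_map.1 hq2 with ⟨q', hq', rfl⟩
    rcases (PySem.List.mem_enumerate_iff _ _ _).1 hq' with ⟨x, hx, rfl⟩
    dsimp only
    omega
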